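-- pv_equiv track=rewrite | github.com/wfondrie/diadem | diadem/align.py | _expand_window
-- ===== SOURCE A (Python) =====
-- def _expand_window(path, len_x, len_y, radius):
--     """Expands the window around path and returns a new window"""
--     path_ = set(path)
--     path_range = range(-radius, radius+1)
--     window = set()
--
--     for i, j in path:
--         for a, b in ((i+a, j+b) for a in path_range for b in path_range):
--             if 0 <= a < len_x and 0 <= b < len_y:
--                 path_.add((a, b))
--
--     for i, j in path_:
--         i *= 2
--         j *= 2
--         for a, b in ((i, j), (i, j+1), (i+1, j), (i+1, j+1)):
--             if 0 <= a < len_x and 0 <= b < len_y: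
--                 window.add((a, b))
--
--     return sorted(window)
-- ===== SOURCE B (Python) =====
-- def _expand_window(path, len_x, len_y, radius):
--     """Expands the window around path and returns a new window (single fused pass)."""
--     window = set()
--
--     def emit(a, b):
--         for c, d in ((2*a, 2*b), (2*a, 2*b+1), (2*a+1, 2*b), (2*a+1, 2*b+1)):
--             if 0 <= c < len_x and 0 <= d < len_y:
--                 window.add((c, d))
--
--     for i, j in path:
--         emit(i, j)  # the original path point is always part of the window
--         for a in range(i - radius, i + radius + 1):
--             for b in range(j - radius, j + radius + 1):
--                 if 0 <= a < len_x and 0 <= b < len_y: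
--                     emit(a, b)
--
--     return sorted(window)
-- ===== Notes on version B (the rewrite author's own statement) =====
-- stated objective: simpler
-- what changed: B fuses A's two passes into one loop over the original path: the intermediate expanded set `path_` is never materialized; each in-bounds neighbourhood cell (and the path point itself) is immediately doubled into its four window cells, since out-of-bounds path points can never contribute a doubled in-bounds cell.
import Mathlib
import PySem

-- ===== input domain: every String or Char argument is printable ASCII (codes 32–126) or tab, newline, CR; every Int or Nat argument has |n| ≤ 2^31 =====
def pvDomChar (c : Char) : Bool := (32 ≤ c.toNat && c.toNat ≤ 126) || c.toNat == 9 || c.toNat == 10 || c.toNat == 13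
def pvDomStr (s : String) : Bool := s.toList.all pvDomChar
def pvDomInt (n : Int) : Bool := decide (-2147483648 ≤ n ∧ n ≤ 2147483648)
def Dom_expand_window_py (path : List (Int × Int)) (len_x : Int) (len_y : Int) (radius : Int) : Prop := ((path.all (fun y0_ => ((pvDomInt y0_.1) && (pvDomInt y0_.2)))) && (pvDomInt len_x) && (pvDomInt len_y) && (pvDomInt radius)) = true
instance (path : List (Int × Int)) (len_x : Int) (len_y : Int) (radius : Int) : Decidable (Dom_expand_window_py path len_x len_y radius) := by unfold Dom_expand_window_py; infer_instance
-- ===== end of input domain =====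

-- B fuses A's two passes into one loop over the path, dropping the intermediate expanded set (same cost).


-- ===== PORT A =====
def expand_window_py (path : List (Int × Int)) (len_x : Int) (len_y : Int) (radius : Int) : List (Int × Int) :=
  let path0 : PySem.Set (Int × Int) := PySem.Set.ofList path
  let path_range := PySem.List.pyRange (-radius) (radius + 1) 1
  let path_ := path.foldl (fun p ij =>
      (path_range.flatMap (fun a => path_range.map (fun b => (ij.1 + a, ij.2 + b)))).foldl
        (fun p ab =>
          if 0 ≤ ab.1 ∧ ab.1 < len_x ∧ 0 ≤ ab.2 ∧ ab.2 < len_y then PySem.Set.add p ab else p)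
        p)
    path0
  let window := path_.foldl (fun w ij =>
      let i := ij.1 * 2
      let j := ij.2 * 2
      [(i, j), (i, j + 1), (i + 1, j), (i + 1, j + 1)].foldl
        (fun w ab =>
          if 0 ≤ ab.1 ∧ ab.1 < len_x ∧ 0 ≤ ab.2 ∧ ab.2 < len_y then PySem.Set.add w ab else w)
        w)
    PySem.Set.empty
  PySem.List.sorted window (fun p => toLex p) false   -- sorted(window): Python tuple order = lexicographic

-- ===== PORT B =====
-- Source B's `emit(a, b)`: add the four in-bounds doubled cells of (a, b) to the window
def pvEmit (len_x len_y : Int) (w : PySem.Set (Int × Int)) (a b : Int) : PySem.Set (Int × Int) :=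
  [(2 * a, 2 * b), (2 * a, 2 * b + 1), (2 * a + 1, 2 * b), (2 * a + 1, 2 * b + 1)].foldl
    (fun w cd =>
      if 0 ≤ cd.1 ∧ cd.1 < len_x ∧ 0 ≤ cd.2 ∧ cd.2 < len_y then PySem.Set.add w cd else w)
    w

def expand_window_py_alt (path : List (Int × Int)) (len_x : Int) (len_y : Int) (radius : Int) : List (Int × Int) :=
  let window := path.foldl (fun w ij =>
      let w := pvEmit len_x len_y w ij.1 ij.2
      (PySem.List.pyRange (ij.1 - radius) (ij.1 + radius + 1) 1).foldl (fun w a =>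
        (PySem.List.pyRange (ij.2 - radius) (ij.2 + radius + 1) 1).foldl (fun w b =>
          if 0 ≤ a ∧ a < len_x ∧ 0 ≤ b ∧ b < len_y then pvEmit len_x len_y w a b else w) w) w)
    PySem.Set.empty
  PySem.List.sorted window (fun p => toLex p) false

-- ===== PRECONDITION & SPEC =====
def Spec_expand_window_py (path : List (Int × Int)) (len_x : Int) (len_y : Int) (radius : Int) (out : List (Int × Int)) : Prop := out = expand_window_py_alt path len_x len_y radius
instance (path : List (Int × Int)) (len_x : Int) (len_y : Int) (radius : Int) (out : List (Int × Int)) : Decidable (Spec_expand_window_py path len_x len_y radius out) := by unfold Spec_expand_window_py; infer_instance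

-- ===== CLAIM (what is proved, stated in full; the proofs are below) =====
def Claim_equal_expand_window_py : Prop := ∀ (path : List (Int × Int)) (len_x : Int) (len_y : Int) (radius : Int), Dom_expand_window_py path len_x len_y radius → Spec_expand_window_py path len_x len_y radius (expand_window_py path len_x len_y radius)

-- ===== LEMMAS AND PROOFS =====

-- proof-only names for the two window sets (definitionally the `window` of each port)
def pvWinA (path : List (Int × Int)) (len_x len_y radius : Int) : PySem.Set (Int × Int) :=
  (path.foldl (fun p ij =>
      ((PySem.List.pyRange (-radius) (radius + 1) 1).flatMap
        (fun a => (PySem.List.pyRange (-radius) (radius + 1) 1).map (fun b => (ij.1 + a, ij.2 + b)))).foldl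
        (fun p ab => if 0 ≤ ab.1 ∧ ab.1 < len_x ∧ 0 ≤ ab.2 ∧ ab.2 < len_y then PySem.Set.add p ab else p)
        p)
    (PySem.Set.ofList path)).foldl (fun w ij =>
      [(ij.1 * 2, ij.2 * 2), (ij.1 * 2, ij.2 * 2 + 1), (ij.1 * 2 + 1, ij.2 * 2), (ij.1 * 2 + 1, ij.2 * 2 + 1)].foldl
        (fun w ab => if 0 ≤ ab.1 ∧ ab.1 < len_x ∧ 0 ≤ ab.2 ∧ ab.2 < len_y then PySem.Set.add w ab else w)
        w)
    PySem.Set.empty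

def pvWinB (path : List (Int × Int)) (len_x len_y radius : Int) : PySem.Set (Int × Int) :=
  path.foldl (fun w ij =>
      (PySem.List.pyRange (ij.1 - radius) (ij.1 + radius + 1) 1).foldl (fun w a =>
        (PySem.List.pyRange (ij.2 - radius) (ij.2 + radius + 1) 1).foldl (fun w b =>
          if 0 ≤ a ∧ a < len_x ∧ 0 ≤ b ∧ b < len_y then pvEmit len_x len_y w a b else w)
        w)
      (pvEmit len_x len_y w ij.1 ij.2))
    PySem.Set.empty

theorem pvA_eq (path : List (Int × Int)) (len_x len_y radius : Int) :
    expand_window_py path len_x len_y radius =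
      PySem.List.sorted (pvWinA path len_x len_y radius) (fun p => toLex p) false := rfl

theorem pvB_eq (path : List (Int × Int)) (len_x len_y radius : Int) :
    expand_window_py_alt path len_x len_y radius =
      PySem.List.sorted (pvWinB path len_x len_y radius) (fun p => toLex p) false := rfl

-- generic loop shape: a foldl whose step satisfies a membership iff satisfies the lifted iff
theorem pv_mem_foldl_step {a : Type} (l : List a)
    (step : List (Int × Int) -> a -> List (Int × Int)) (Q : a -> (Int × Int) -> Prop)
    (h : ∀ s x y, y ∈ step s x ↔ y ∈ s ∨ Q x y) :
    ∀ (s : List (Int × Int)) (y : Int × Int), y ∈ l.foldl step s ↔ y ∈ s ∨ ∃ x ∈ l, Q x y := by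
  induction l with
  | nil => simp
  | cons x t ih =>
      intro s y
      simp only [List.foldl_cons, ih, h, List.mem_cons]
      constructor
      · rintro ((hy | hq) | ⟨z, hz, hQ⟩)
        · exact Or.inl hy
        · exact Or.inr ⟨x, Or.inl rfl, hq⟩
        · exact Or.inr ⟨z, Or.inr hz, hQ⟩
      · rintro (hy | ⟨z, (rfl | hz), hQ⟩)
        · exact Or.inl (Or.inl hy)
        · exact Or.inl (Or.inr hQ)
        · exact Or.inr ⟨z, hz, hQ⟩

theorem pv_nodup_foldl_step {a : Type} (l : List a)
    (step : List (Int × Int) -> a -> List (Int × Int))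
    (h : ∀ s x, s.Nodup -> (step s x).Nodup) :
    ∀ s : List (Int × Int), s.Nodup -> (l.foldl step s).Nodup := by
  induction l with
  | nil => intro s hs; simpa using hs
  | cons x t ih => intro s hs; exact ih _ (h s x hs)

theorem pv_mem_if_add (len_x len_y : Int) (s : List (Int × Int)) (x y : Int × Int) :
    y ∈ (if 0 ≤ x.1 ∧ x.1 < len_x ∧ 0 ≤ x.2 ∧ x.2 < len_y then PySem.Set.add s x else s) ↔
      y ∈ s ∨ ((0 ≤ x.1 ∧ x.1 < len_x ∧ 0 ≤ x.2 ∧ x.2 < len_y) ∧ y = x) := by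
  split_ifs with hb
  · simp [PySem.Set.mem_add, hb]
  · simp [hb]

theorem pv_nodup_if_add (len_x len_y : Int) (s : List (Int × Int)) (x : Int × Int)
    (hs : s.Nodup) :
    (if 0 ≤ x.1 ∧ x.1 < len_x ∧ 0 ≤ x.2 ∧ x.2 < len_y then PySem.Set.add s x else s).Nodup := by
  split_ifs
  · exact PySem.Set.nodup_add s x hs
  · exact hs

-- shorthand: the four doubled cells of p that are in bounds, one of them is c
def pvE (len_x len_y : Int) (p c : Int × Int) : Prop :=
  ∃ cd ∈ [(2 * p.1, 2 * p.2), (2 * p.1, 2 * p.2 + 1), (2 * p.1 + 1, 2 * p.2), (2 * p.1 + 1, 2 * p.2 + 1)],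
    (0 ≤ cd.1 ∧ cd.1 < len_x ∧ 0 ≤ cd.2 ∧ cd.2 < len_y) ∧ c = cd

theorem pv_mem_emit (len_x len_y : Int) (w : PySem.Set (Int × Int)) (a b : Int) (y : Int × Int) :
    y ∈ pvEmit len_x len_y w a b ↔ y ∈ w ∨ pvE len_x len_y (a, b) y := by
  unfold pvEmit pvE
  exact pv_mem_foldl_step _ _ _ (fun s x y => pv_mem_if_add len_x len_y s x y) w y

theorem pv_nodup_emit (len_x len_y : Int) (w : PySem.Set (Int × Int)) (a b : Int)
    (hw : w.Nodup) : (pvEmit len_x len_y w a b).Nodup := by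
  unfold pvEmit
  exact pv_nodup_foldl_step _ _ (fun s x hs => pv_nodup_if_add len_x len_y s x hs) w hw

-- the common membership characterisation both windows satisfy
def pvWinMem (path : List (Int × Int)) (len_x len_y radius : Int) (c : Int × Int) : Prop :=
  ∃ ij ∈ path, ∃ p : Int × Int,
    (p = ij ∨ (ij.1 - radius ≤ p.1 ∧ p.1 < ij.1 + radius + 1 ∧
               ij.2 - radius ≤ p.2 ∧ p.2 < ij.2 + radius + 1 ∧
               0 ≤ p.1 ∧ p.1 < len_x ∧ 0 ≤ p.2 ∧ p.2 < len_y)) ∧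
    pvE len_x len_y p c

-- membership in A's intermediate expanded set path_
theorem pv_mem_pathA (path : List (Int × Int)) (len_x len_y radius : Int) (p : Int × Int) :
    p ∈ path.foldl (fun p ij =>
        ((PySem.List.pyRange (-radius) (radius + 1) 1).flatMap
          (fun a => (PySem.List.pyRange (-radius) (radius + 1) 1).map (fun b => (ij.1 + a, ij.2 + b)))).foldl
          (fun p ab => if 0 ≤ ab.1 ∧ ab.1 < len_x ∧ 0 ≤ ab.2 ∧ ab.2 < len_y then PySem.Set.add p ab else p)
          p)
      (PySem.Set.ofList path) ↔
    p ∈ path ∨ ∃ ij ∈ path,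
      (ij.1 - radius ≤ p.1 ∧ p.1 < ij.1 + radius + 1 ∧
       ij.2 - radius ≤ p.2 ∧ p.2 < ij.2 + radius + 1 ∧
       0 ≤ p.1 ∧ p.1 < len_x ∧ 0 ≤ p.2 ∧ p.2 < len_y) := by
  rw [pv_mem_foldl_step _ _
        (fun ij y => ∃ ab ∈ (PySem.List.pyRange (-radius) (radius + 1) 1).flatMap
          (fun a => (PySem.List.pyRange (-radius) (radius + 1) 1).map (fun b => (ij.1 + a, ij.2 + b))),
          (0 ≤ ab.1 ∧ ab.1 < len_x ∧ 0 ≤ ab.2 ∧ ab.2 < len_y) ∧ y = ab)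
        (fun s ij y => pv_mem_foldl_step _ _ _ (fun s x y => pv_mem_if_add len_x len_y s x y) s y)]
  rw [PySem.Set.mem_ofList]
  apply or_congr Iff.rfl
  apply exists_congr; intro ij
  apply and_congr Iff.rfl
  simp only [List.mem_flatMap, List.mem_map, PySem.List.mem_pyRange_one]
  constructor
  · rintro ⟨ab, ⟨a, ⟨ha1, ha2⟩, b, ⟨hb1, hb2⟩, rfl⟩, hbnd, rfl⟩
    simp only at hbnd ⊢
    omega
  · rintro ⟨h1, h2, h3, h4, h5, h6, h7, h8⟩
    refine ⟨p, ⟨p.1 - ij.1, by omega, p.2 - ij.2, by omega, ?_⟩, ⟨h5, h6, h7, h8⟩, rfl⟩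
    obtain ⟨x, y⟩ := p
    simp only [Prod.mk.injEq]
    omega

theorem pv_memA (path : List (Int × Int)) (len_x len_y radius : Int) (c : Int × Int) :
    c ∈ pvWinA path len_x len_y radius ↔ pvWinMem path len_x len_y radius c := by
  unfold pvWinA pvWinMem
  rw [pv_mem_foldl_step _ _
        (fun ij y => ∃ ab ∈ [(ij.1 * 2, ij.2 * 2), (ij.1 * 2, ij.2 * 2 + 1),
                             (ij.1 * 2 + 1, ij.2 * 2), (ij.1 * 2 + 1, ij.2 * 2 + 1)],
          (0 ≤ ab.1 ∧ ab.1 < len_x ∧ 0 ≤ ab.2 ∧ ab.2 < len_y) ∧ y = ab)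
        (fun s ij y => pv_mem_foldl_step _ _ _ (fun s x y => pv_mem_if_add len_x len_y s x y) s y)]
  simp only [PySem.Set.empty, List.not_mem_nil, false_or]
  constructor
  · rintro ⟨p, hp, hE⟩
    rw [pv_mem_pathA path len_x len_y radius p] at hp
    rcases hp with hp | ⟨ij, hij, hb⟩
    · exact ⟨p, hp, p, Or.inl rfl, by simpa [pvE, mul_comm] using hE⟩
    · exact ⟨ij, hij, p, Or.inr hb, by simpa [pvE, mul_comm] using hE⟩
  · rintro ⟨ij, hij, p, (rfl | hb), hE⟩
    · refine ⟨p, ?_, by simpa [pvE, mul_comm] using hE⟩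
      rw [pv_mem_pathA path len_x len_y radius p]; exact Or.inl hij
    · refine ⟨p, ?_, by simpa [pvE, mul_comm] using hE⟩
      rw [pv_mem_pathA path len_x len_y radius p]; exact Or.inr ⟨ij, hij, hb⟩

-- membership in the body of B's outer loop
theorem pv_stepB_mem (len_x len_y radius : Int) (w : PySem.Set (Int × Int)) (ij : Int × Int)
    (y : Int × Int) :
    y ∈ (PySem.List.pyRange (ij.1 - radius) (ij.1 + radius + 1) 1).foldl (fun w a =>
        (PySem.List.pyRange (ij.2 - radius) (ij.2 + radius + 1) 1).foldl (fun w b =>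
          if 0 ≤ a ∧ a < len_x ∧ 0 ≤ b ∧ b < len_y then pvEmit len_x len_y w a b else w)
        w)
      (pvEmit len_x len_y w ij.1 ij.2) ↔
    y ∈ w ∨ pvE len_x len_y ij y ∨
      ∃ a, (ij.1 - radius ≤ a ∧ a < ij.1 + radius + 1) ∧
      ∃ b, (ij.2 - radius ≤ b ∧ b < ij.2 + radius + 1) ∧
        (0 ≤ a ∧ a < len_x ∧ 0 ≤ b ∧ b < len_y) ∧ pvE len_x len_y (a, b) y := by
  have hif : ∀ (a : Int) (s : List (Int × Int)) (b : Int) (y : Int × Int),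
      y ∈ (if 0 ≤ a ∧ a < len_x ∧ 0 ≤ b ∧ b < len_y then pvEmit len_x len_y s a b else s) ↔
        y ∈ s ∨ ((0 ≤ a ∧ a < len_x ∧ 0 ≤ b ∧ b < len_y) ∧ pvE len_x len_y (a, b) y) := by
    intro a s b y
    split_ifs with hc
    · rw [pv_mem_emit]; tauto
    · tauto
  rw [pv_mem_foldl_step _ _
        (fun a y => ∃ b ∈ PySem.List.pyRange (ij.2 - radius) (ij.2 + radius + 1) 1,
          (0 ≤ a ∧ a < len_x ∧ 0 ≤ b ∧ b < len_y) ∧ pvE len_x len_y (a, b) y)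
        (fun s a y => pv_mem_foldl_step _
          (fun w b => if 0 ≤ a ∧ a < len_x ∧ 0 ≤ b ∧ b < len_y then pvEmit len_x len_y w a b else w)
          (fun b y => (0 ≤ a ∧ a < len_x ∧ 0 ≤ b ∧ b < len_y) ∧ pvE len_x len_y (a, b) y)
          (hif a) s y)]
  rw [pv_mem_emit]
  simp only [PySem.List.mem_pyRange_one]
  tauto

theorem pv_memB (path : List (Int × Int)) (len_x len_y radius : Int) (c : Int × Int) :
    c ∈ pvWinB path len_x len_y radius ↔ pvWinMem path len_x len_y radius c := by
  unfold pvWinB pvWinMem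
  rw [pv_mem_foldl_step _ _
        (fun ij y => pvE len_x len_y ij y ∨
          ∃ a, (ij.1 - radius ≤ a ∧ a < ij.1 + radius + 1) ∧
          ∃ b, (ij.2 - radius ≤ b ∧ b < ij.2 + radius + 1) ∧
            (0 ≤ a ∧ a < len_x ∧ 0 ≤ b ∧ b < len_y) ∧ pvE len_x len_y (a, b) y)
        (fun s ij y => pv_stepB_mem len_x len_y radius s ij y)]
  simp only [PySem.Set.empty, List.not_mem_nil, false_or]
  apply exists_congr; intro ij
  apply and_congr Iff.rfl
  constructor
  · rintro (hE | ⟨a, ha, b, hb, hbnd, hE⟩)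
    · exact ⟨ij, Or.inl rfl, hE⟩
    · exact ⟨(a, b), Or.inr ⟨ha.1, ha.2, hb.1, hb.2, hbnd⟩, hE⟩
  · rintro ⟨p, (rfl | hb), hE⟩
    · exact Or.inl hE
    · exact Or.inr ⟨p.1, ⟨hb.1, hb.2.1⟩, p.2, ⟨hb.2.2.1, hb.2.2.2.1⟩,
        ⟨hb.2.2.2.2.1, hb.2.2.2.2.2.1, hb.2.2.2.2.2.2.1, hb.2.2.2.2.2.2.2⟩, by simpa using hE⟩

theorem pv_nodupA (path : List (Int × Int)) (len_x len_y radius : Int) :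
    (pvWinA path len_x len_y radius).Nodup := by
  unfold pvWinA
  exact pv_nodup_foldl_step _ _
    (fun s ij hs => pv_nodup_foldl_step _ _ (fun s x hs => pv_nodup_if_add len_x len_y s x hs) s hs)
    _ List.nodup_nil

theorem pv_nodupB (path : List (Int × Int)) (len_x len_y radius : Int) :
    (pvWinB path len_x len_y radius).Nodup := by
  unfold pvWinB
  refine pv_nodup_foldl_step _ _ (fun s ij hs => ?_) _ List.nodup_nil
  refine pv_nodup_foldl_step _ _ (fun s a hs => ?_) _ (pv_nodup_emit len_x len_y s ij.1 ij.2 hs)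
  refine pv_nodup_foldl_step _ _ (fun s b hs => ?_) _ hs
  split_ifs
  · exact pv_nodup_emit len_x len_y s a b hs
  · exact hs

-- ===== VERDICT (by name: the statement is the Claim_ definition above) =====
theorem expand_window_py_spec : Claim_equal_expand_window_py := by
  intro path len_x len_y radius _
  unfold Spec_expand_window_py
  rw [pvA_eq, pvB_eq]
  refine PySem.List.sorted_eq_sorted_of_perm _ _ _ (fun _ _ h => h) ?_
  rw [List.perm_ext_iff_of_nodup (pv_nodupA path len_x len_y radius) (pv_nodupB path len_x len_y radius)]
  intro c
  rw [pv_memA, pv_memB]
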